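-- pv_equiv track=rewrite | github.com/jony100200/-Kalponic-Studio-Toolbox- | Apps/KS MetaMaker/ks_metamaker/tagger.py | _classify_from_tags
-- ===== SOURCE A (Python) =====
-- from typing import List, Optional
--
-- def _classify_from_tags(tags: List[str]) -> str:
--     """Determine category from tags"""
--     tag_text = " ".join(tags).lower()
--
--     if any(word in tag_text for word in ["object", "prop", "item", "tool", "weapon", "container"]):
--         return "props"
--     elif any(word in tag_text for word in ["background", "scene", "environment", "sky", "city", "nature"]):
--         return "backgrounds"
--     elif any(word in tag_text for word in ["character", "person", "human", "animal", "figure"]):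
--         return "characters"
--     else:
--         return "backgrounds"  # default
-- ===== SOURCE B (Python) =====
-- from typing import List
--
-- # Flat keyword -> priority table (0 = props, 1 = backgrounds, 2 = characters).
-- KEYWORD_PRIORITY = [
--     ("object", 0), ("prop", 0), ("item", 0), ("tool", 0), ("weapon", 0), ("container", 0),
--     ("background", 1), ("scene", 1), ("environment", 1), ("sky", 1), ("city", 1), ("nature", 1),
--     ("character", 2), ("person", 2), ("human", 2), ("animal", 2), ("figure", 2),
-- ]
-- NAMES = ("props", "backgrounds", "characters", "backgrounds")  # index 3 = no match -> default
--
-- def _classify_from_tags(tags: List[str]) -> str: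
--     # Single pass over the individual tags (no joined string): since no keyword
--     # contains a space, a keyword occurs in " ".join(tags).lower() iff it occurs
--     # in some tag.lower(). Track the minimum matching priority.
--     best = 3
--     for tag in tags:
--         low = tag.lower()
--         for kw, prio in KEYWORD_PRIORITY:
--             if kw in low and prio < best:
--                 best = prio
--     return NAMES[best]
-- ===== Notes on version B (the rewrite author's own statement) =====
-- stated objective: alternative
-- what changed: Instead of building one joined lowercase string and testing three hard-coded keyword groups against it in an if/elif chain, B makes a single pass over the individual tags with a flat keyword-to-priority table and a minimum-priority accumulator, then maps the final priority to the category name via an indexed tuple (correct because no keyword contains a space, so a keyword occurs in the joined text iff it occurs in some single tag).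
import Mathlib
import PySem

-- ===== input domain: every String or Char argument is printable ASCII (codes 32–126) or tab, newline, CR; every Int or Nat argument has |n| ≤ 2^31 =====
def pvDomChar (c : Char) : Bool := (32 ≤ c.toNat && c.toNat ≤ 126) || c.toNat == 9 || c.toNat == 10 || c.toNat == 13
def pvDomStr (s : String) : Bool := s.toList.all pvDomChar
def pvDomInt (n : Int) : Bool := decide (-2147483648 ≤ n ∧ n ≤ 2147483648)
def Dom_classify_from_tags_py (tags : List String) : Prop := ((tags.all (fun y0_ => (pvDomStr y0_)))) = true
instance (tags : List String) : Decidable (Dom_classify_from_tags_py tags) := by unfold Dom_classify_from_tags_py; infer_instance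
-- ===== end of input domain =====

-- B replaces A's joined-string if/elif keyword-group chain by a single pass over the
-- individual tags with a flat keyword→priority table and a minimum-priority accumulator
-- (alternative decomposition; same cost, same keywords, same priorities and default).

-- ===== PORT A =====
def classify_from_tags_py (tags : List String) : String :=
  let tag_text := PySem.Str.lower (PySem.Str.join " " tags)
  if (["object", "prop", "item", "tool", "weapon", "container"].any
        (fun word => PySem.Str.isIn word tag_text)) then "props"
  else if (["background", "scene", "environment", "sky", "city", "nature"].any
        (fun word => PySem.Str.isIn word tag_text)) then "backgrounds"
  else if (["character", "person", "human", "animal", "figure"].any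
        (fun word => PySem.Str.isIn word tag_text)) then "characters"
  else "backgrounds"

-- ===== PORT B =====
def pvKW : List (String × Nat) :=
  [("object", 0), ("prop", 0), ("item", 0), ("tool", 0), ("weapon", 0), ("container", 0),
   ("background", 1), ("scene", 1), ("environment", 1), ("sky", 1), ("city", 1), ("nature", 1),
   ("character", 2), ("person", 2), ("human", 2), ("animal", 2), ("figure", 2)]

def pvNAMES : List String := ["props", "backgrounds", "characters", "backgrounds"]

def classify_from_tags_py_alt (tags : List String) : String :=
  let best := tags.foldl (fun best tag =>
      let low := PySem.Str.lower tag
      pvKW.foldl (fun b kp => if PySem.Str.isIn kp.1 low ∧ kp.2 < b then kp.2 else b) best) 3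
  -- NAMES[best]: best ≤ 3 always holds, so the Python index is always in range
  pvNAMES.getD best "backgrounds"

-- ===== PRECONDITION & SPEC =====
def Spec_classify_from_tags_py (tags : List String) (out : String) : Prop := out = classify_from_tags_py_alt tags
instance (tags : List String) (out : String) : Decidable (Spec_classify_from_tags_py tags out) := by unfold Spec_classify_from_tags_py; infer_instance

-- ===== CLAIM =====
def Claim_equal_classify_from_tags_py : Prop := ∀ (tags : List String), Dom_classify_from_tags_py tags → Spec_classify_from_tags_py tags (classify_from_tags_py tags)

-- ===== LEMMAS AND PROOFS =====

-- keyword groups (proof-side abbreviations)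
def pvG0 : List String := ["object", "prop", "item", "tool", "weapon", "container"]
def pvG1 : List String := ["background", "scene", "environment", "sky", "city", "nature"]
def pvG2 : List String := ["character", "person", "human", "animal", "figure"]

def pvQ (ws : List String) (t : String) : Bool :=
  ws.any (fun w => PySem.Str.isIn w (PySem.Str.lower t))

def pvM (t : String) : Nat :=
  if pvQ pvG0 t then 0 else if pvQ pvG1 t then 1 else if pvQ pvG2 t then 2 else 3

-- a word without c that is a prefix of u ++ c :: v is a prefix of u
theorem pv_prefix_split {w u v : List Char} {c : Char} (hc : c ∉ w)
    (h : w <+: u ++ c :: v) : w <+: u := by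
  induction w generalizing u with
  | nil => exact List.nil_prefix
  | cons y w' ih =>
    cases u with
    | nil =>
      rcases List.cons_prefix_cons.mp h with ⟨rfl, -⟩
      exact absurd List.mem_cons_self hc
    | cons z u' =>
      rcases List.cons_prefix_cons.mp h with ⟨rfl, h'⟩
      exact List.cons_prefix_cons.mpr ⟨rfl, ih (fun hm => hc (List.mem_cons_of_mem _ hm)) h'⟩

-- a word without c is an infix of u ++ c :: v iff it is an infix of u or of v
theorem pv_infix_split {w : List Char} {c : Char} (hc : c ∉ w) :
    ∀ u v : List Char, (w <:+: u ++ c :: v) ↔ (w <:+: u ∨ w <:+: v) := by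
  intro u v
  induction u with
  | nil =>
    simp only [List.nil_append]
    constructor
    · intro h
      rcases List.infix_cons_iff.mp h with h | h
      · obtain rfl := List.prefix_nil.mp (pv_prefix_split hc (u := []) h)
        exact Or.inl List.nil_infix
      · exact Or.inr h
    · rintro (h | h)
      · obtain rfl := List.infix_nil.mp h
        exact List.nil_infix
      · exact h.trans (List.suffix_cons c v).isInfix
  | cons z u' ih =>
    constructor
    · intro h
      rcases List.infix_cons_iff.mp h with h | h
      · exact Or.inl (pv_prefix_split hc (u := z :: u') h).isInfix
      · rcases ih.mp h with h | h
        · exact Or.inl (List.infix_cons h)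
        · exact Or.inr h
    · rintro (h | h)
      · exact h.trans ((z :: u').prefix_append (c :: v)).isInfix
      · exact h.trans (((List.suffix_cons c v).trans
          (List.suffix_append (z :: u') (c :: v))).isInfix)

-- lower distributes over the space-join
theorem pv_lower_join (ts : List (List Char)) :
    PySem.Chars.lower (PySem.Chars.join [' '] ts)
      = PySem.Chars.join [' '] (ts.map PySem.Chars.lower) := by
  induction ts with
  | nil => simp [PySem.Chars.join_nil, PySem.Chars.lower]
  | cons t ts ih =>
    cases ts with
    | nil => simp [PySem.Chars.join_singleton]
    | cons b l =>
      rw [PySem.Chars.join_cons_cons, List.map_cons, List.map_cons,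
          PySem.Chars.join_cons_cons, ← List.map_cons]
      show PySem.Chars.lower (t ++ [' '] ++ _) = _
      simp only [PySem.Chars.lower, List.map_append] at ih ⊢
      rw [ih]
      rfl

-- a nonempty, space-free word occurs in the space-join iff it occurs in some part
theorem pv_isIn_join (w : List Char) (hne : w ≠ []) (hsp : ' ' ∉ w) (ts : List (List Char)) :
    PySem.Chars.isIn w (PySem.Chars.join [' '] ts)
      = ts.any (fun t => PySem.Chars.isIn w t) := by
  rw [Bool.eq_iff_iff]
  simp only [PySem.Chars.isIn_iff_infix, List.any_eq_true]
  induction ts with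
  | nil =>
    simp [PySem.Chars.join_nil, List.infix_nil, hne]
  | cons t ts ih =>
    cases ts with
    | nil => simp [PySem.Chars.join_singleton]
    | cons b l =>
      rw [PySem.Chars.join_cons_cons, List.append_assoc]
      rw [show ([' '] ++ PySem.Chars.join [' '] (b :: l)) = ' ' :: PySem.Chars.join [' '] (b :: l) from rfl]
      rw [pv_infix_split hsp, ih]
      simp only [List.mem_cons]
      constructor
      · rintro (h | ⟨x, hx, h⟩)
        · exact ⟨t, Or.inl rfl, h⟩
        · exact ⟨x, Or.inr hx, h⟩
      · rintro ⟨x, (rfl | hx), h⟩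
        · exact Or.inl h
        · exact Or.inr ⟨x, hx, h⟩

-- Str-level: a nonempty, space-free keyword is in the joined lowered text iff in some lowered tag
theorem pv_str_any (w : String) (hne : w.toList ≠ []) (hsp : ' ' ∉ w.toList) (tags : List String) :
    PySem.Str.isIn w (PySem.Str.lower (PySem.Str.join " " tags))
      = tags.any (fun t => PySem.Str.isIn w (PySem.Str.lower t)) := by
  simp only [PySem.Str.isIn_eq, PySem.Str.toList_lower, PySem.Str.toList_join]
  rw [show (" ".toList) = [' '] from rfl, pv_lower_join, pv_isIn_join w.toList hne hsp]
  simp [List.any_map, Function.comp_def]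

theorem pv_any_swap (ws tags : List String) (f : String → String → Bool) :
    (ws.any fun w => tags.any fun t => f w t) = (tags.any fun t => ws.any fun w => f w t) := by
  rw [Bool.eq_iff_iff]
  simp only [List.any_eq_true]
  constructor <;> rintro ⟨x, hx, y, hy, h⟩ <;> exact ⟨y, hy, x, hx, h⟩

theorem pv_any_joined (ws tags : List String)
    (h : ∀ w ∈ ws, w.toList ≠ [] ∧ ' ' ∉ w.toList) :
    (ws.any fun w => PySem.Str.isIn w (PySem.Str.lower (PySem.Str.join " " tags)))
      = tags.any (pvQ ws) := by
  have h1 : ∀ ws' : List String, (∀ w ∈ ws', w.toList ≠ [] ∧ ' ' ∉ w.toList) →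
      (ws'.any fun w => PySem.Str.isIn w (PySem.Str.lower (PySem.Str.join " " tags)))
        = ws'.any fun w => tags.any fun t => PySem.Str.isIn w (PySem.Str.lower t) := by
    intro ws'
    induction ws' with
    | nil => intro _; rfl
    | cons w ws' ih =>
      intro hh
      simp only [List.any_cons]
      rw [pv_str_any w (hh w List.mem_cons_self).1 (hh w List.mem_cons_self).2 tags,
          ih (fun x hx => hh x (List.mem_cons_of_mem _ hx))]
  rw [h1 ws h, pv_any_swap]
  rfl

theorem pv_group_step (bw bws : Bool) (p a x : Nat) (hp : p ≤ a) (hx : x = if bws then p else a) :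
    (if bw then min p x else x) = if (bw || bws) then p else a := by
  subst hx
  cases bw <;> cases bws <;> simp [Nat.min_eq_left hp]

-- a foldr over one constant-priority keyword group
theorem pv_foldr_group (t : String) (p : Nat) (ws : List String) (a : Nat) (hp : p ≤ a) :
    ((ws.map (fun w => (w, p))).foldr
        (fun kp acc => if PySem.Str.isIn kp.1 (PySem.Str.lower t) then min kp.2 acc else acc) a)
      = if ws.any (fun w => PySem.Str.isIn w (PySem.Str.lower t)) then p else a := by
  induction ws with
  | nil => simp
  | cons w ws ih =>
    simp only [List.map_cons, List.foldr_cons, List.any_cons, ih]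
    exact pv_group_step _ _ p a _ hp rfl

def pvMfold (t : String) : Nat :=
  pvKW.foldr (fun kp acc => if PySem.Str.isIn kp.1 (PySem.Str.lower t) then min kp.2 acc else acc) 3

theorem pv_Mfold_eq (t : String) : pvMfold t = pvM t := by
  have hsplit : pvKW = (pvG0.map (fun w => (w, 0))) ++ (pvG1.map (fun w => (w, 1)))
      ++ (pvG2.map (fun w => (w, 2))) := rfl
  unfold pvMfold
  rw [hsplit, List.foldr_append, List.foldr_append,
      pv_foldr_group t 2 pvG2 3 (by omega)]
  rw [pv_foldr_group t 1 pvG1 _ (by split_ifs <;> omega)]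
  rw [pv_foldr_group t 0 pvG0 _ (by omega)]
  unfold pvM pvQ
  rfl

-- the inner keyword loop computes the min of the start value and the tag's best priority
theorem pv_foldl_min (l : List (String × Nat)) (g : String → Bool)
    (hl : ∀ kp ∈ l, kp.2 ≤ 3) :
    ∀ b, b ≤ 3 →
      l.foldl (fun b kp => if g kp.1 ∧ kp.2 < b then kp.2 else b) b
        = min b (l.foldr (fun kp acc => if g kp.1 then min kp.2 acc else acc) 3) := by
  induction l with
  | nil => intro b hb; simp; omega
  | cons kp l ih =>
    intro b hb
    have hkp : kp.2 ≤ 3 := hl kp List.mem_cons_self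
    have hl' : ∀ q ∈ l, q.2 ≤ 3 := fun q hq => hl q (List.mem_cons_of_mem _ hq)
    simp only [List.foldl_cons, List.foldr_cons]
    have hb' : (if g kp.1 = true ∧ kp.2 < b then kp.2 else b) ≤ 3 := by split_ifs <;> omega
    rw [ih hl' _ hb']
    by_cases hg : g kp.1 = true
    · simp only [hg, true_and, if_pos]
      have hF := Nat.zero_le (l.foldr (fun kp acc => if g kp.1 = true then min kp.2 acc else acc) 3)
      simp only [Nat.min_def]
      split_ifs <;> omega
    · simp [hg]

def pvNf (tags : List String) : Nat := tags.foldr (fun t a => min (pvM t) a) 3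

theorem pv_Nf_le (tags : List String) : pvNf tags ≤ 3 := by
  induction tags with
  | nil => simp [pvNf]
  | cons t ts ih =>
    unfold pvNf at ih ⊢
    simp only [List.foldr_cons]
    omega

theorem pv_outer (tags : List String) : ∀ b, b ≤ 3 →
    tags.foldl (fun best tag =>
        let low := PySem.Str.lower tag
        pvKW.foldl (fun b kp => if PySem.Str.isIn kp.1 low ∧ kp.2 < b then kp.2 else b) best) b
      = min b (pvNf tags) := by
  induction tags with
  | nil => intro b hb; simp [pvNf]; omega
  | cons t ts ih =>
    intro b hb
    simp only [List.foldl_cons]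
    have hstep :
        (pvKW.foldl (fun b kp => if PySem.Str.isIn kp.1 (PySem.Str.lower t) ∧ kp.2 < b
            then kp.2 else b) b) = min b (pvM t) := by
      rw [pv_foldl_min pvKW (fun w => PySem.Str.isIn w (PySem.Str.lower t)) (by decide) b hb]
      rw [show pvKW.foldr (fun kp acc => if PySem.Str.isIn kp.1 (PySem.Str.lower t)
            then min kp.2 acc else acc) 3 = pvMfold t from rfl, pv_Mfold_eq]
    rw [hstep, ih (min b (pvM t)) (by omega)]
    unfold pvNf
    simp only [List.foldr_cons]
    rw [Nat.min_assoc]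

theorem pv_min_chain (x0 x1 x2 y0 y1 y2 : Bool) :
    min (if x0 then 0 else if x1 then 1 else if x2 then 2 else 3)
        (if y0 then 0 else if y1 then 1 else if y2 then 2 else 3)
      = if (x0 || y0) then 0 else if (x1 || y1) then 1 else if (x2 || y2) then 2 else 3 := by
  cases x0 <;> cases x1 <;> cases x2 <;> cases y0 <;> cases y1 <;> cases y2 <;> simp

theorem pv_Nf_eq (tags : List String) :
    pvNf tags = if tags.any (pvQ pvG0) then 0 else if tags.any (pvQ pvG1) then 1
      else if tags.any (pvQ pvG2) then 2 else 3 := by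
  induction tags with
  | nil => simp [pvNf]
  | cons t ts ih =>
    unfold pvNf at ih ⊢
    simp only [List.foldr_cons, ih, List.any_cons]
    unfold pvM
    exact pv_min_chain _ _ _ _ _ _

-- ===== VERDICT =====
theorem classify_from_tags_py_spec : Claim_equal_classify_from_tags_py := by
  intro tags _
  unfold Spec_classify_from_tags_py
  simp only [classify_from_tags_py, classify_from_tags_py_alt]
  rw [pv_outer tags 3 (by omega)]
  have hmin : min 3 (pvNf tags) = pvNf tags := by
    have := pv_Nf_le tags; omega
  rw [hmin, pv_Nf_eq,
      ← pv_any_joined pvG0 tags (by decide),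
      ← pv_any_joined pvG1 tags (by decide),
      ← pv_any_joined pvG2 tags (by decide)]
  simp only [pvG0, pvG1, pvG2]
  split_ifs <;> simp [pvNAMES]
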